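-- pv_equiv track=rewrite | github.com/weekman90/zadanie_1 | Vikman_Alexandr_dz_5/task_5_3.py | class_group_range
-- ===== SOURCE A (Python) =====
-- def class_group_range(tutors, groups):
--     rez = 0
--     while rez < len(tutors):
--         if rez<len(groups):
--
--             yield tutors[rez], groups[rez]
--             rez += 1
--
--         else:
--
--             yield tutors[rez], None
--             rez += 1
-- ===== SOURCE B (Python) =====
-- def class_group_range(tutors, groups):
--     for t, g in zip(tutors, groups):
--         yield t, g
--     for t in tutors[len(groups):]:
--         yield t, None
-- ===== Notes on version B (the rewrite author's own statement) =====
-- stated objective: simpler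
-- what changed: Replaced the single indexed while-loop with per-element branching by two branch-free passes: a zip over the matched prefix, then a slice of the leftover tutors paired with None.
import Mathlib
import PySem

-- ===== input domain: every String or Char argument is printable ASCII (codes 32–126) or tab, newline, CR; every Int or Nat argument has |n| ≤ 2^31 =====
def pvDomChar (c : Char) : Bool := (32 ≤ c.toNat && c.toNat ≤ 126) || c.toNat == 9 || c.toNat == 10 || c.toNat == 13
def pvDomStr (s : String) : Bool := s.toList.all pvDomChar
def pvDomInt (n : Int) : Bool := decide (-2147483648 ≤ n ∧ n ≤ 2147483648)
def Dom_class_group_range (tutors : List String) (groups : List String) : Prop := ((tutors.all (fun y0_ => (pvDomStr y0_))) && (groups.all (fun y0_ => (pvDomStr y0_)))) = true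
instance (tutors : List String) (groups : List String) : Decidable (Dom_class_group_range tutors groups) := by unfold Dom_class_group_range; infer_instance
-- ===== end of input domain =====

-- B replaces A's indexed while-loop with per-element branching by two branch-free passes
-- (zip over the matched prefix, then the leftover tutors paired with none); objective: simpler.

-- ===== PORT A =====
-- A's while-loop over index rez; each iteration yields one pair and increments rez.
def class_group_range_loop (tutors : List String) (groups : List String) (rez : Nat) :
    List (String × Option String) :=
  if h : rez < tutors.length then
    (if rez < groups.length then
      (tutors[rez], some (groups[rez]!))
    else
      (tutors[rez], none)) :: class_group_range_loop tutors groups (rez + 1)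
  else []
termination_by tutors.length - rez

def class_group_range (tutors : List String) (groups : List String) : List (String × Option String) :=
  class_group_range_loop tutors groups 0

-- ===== PORT B =====
-- zip(tutors, groups) prefix, then tutors[len(groups):] padded with none.
def class_group_range_alt (tutors : List String) (groups : List String) : List (String × Option String) :=
  (List.zipWith (fun t g => (t, some g)) tutors groups)
    ++ (tutors.drop groups.length).map (fun t => (t, none))

-- ===== PRECONDITION & SPEC =====
def Spec_class_group_range (tutors : List String) (groups : List String) (out : List (String × Option String)) : Prop := out = class_group_range_alt tutors groups
instance (tutors : List String) (groups : List String) (out : List (String × Option String)) : Decidable (Spec_class_group_range tutors groups out) := by unfold Spec_class_group_range; infer_instance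

-- ===== CLAIM (what is proved, stated in full; the proofs are below) =====
def Claim_equal_class_group_range : Prop := ∀ (tutors : List String) (groups : List String), Dom_class_group_range tutors groups → Spec_class_group_range tutors groups (class_group_range tutors groups)

-- ===== LEMMAS AND PROOFS =====

theorem alt_cons_cons (a b : String) (t g : List String) :
    class_group_range_alt (a :: t) (b :: g) = (a, some b) :: class_group_range_alt t g := by
  simp [class_group_range_alt]

theorem alt_cons_nil (a : String) (t : List String) :
    class_group_range_alt (a :: t) [] = (a, none) :: class_group_range_alt t [] := by
  simp [class_group_range_alt]

theorem loop_eq_alt_drop (tutors groups : List String) (rez : Nat) :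
    class_group_range_loop tutors groups rez
      = class_group_range_alt (tutors.drop rez) (groups.drop rez) := by
  by_cases h : rez < tutors.length
  · rw [class_group_range_loop, dif_pos h]
    rw [loop_eq_alt_drop tutors groups (rez + 1)]
    have ht : tutors.drop rez = tutors[rez] :: tutors.drop (rez + 1) :=
      List.drop_eq_getElem_cons h
    by_cases hg : rez < groups.length
    · have hgd : groups.drop rez = groups[rez] :: groups.drop (rez + 1) :=
        List.drop_eq_getElem_cons hg
      rw [ht, hgd, alt_cons_cons, if_pos hg]
      rw [getElem!_pos groups rez hg]
    · have hgd : groups.drop rez = [] := List.drop_eq_nil_of_le (by omega)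
      have hgd' : groups.drop (rez + 1) = [] := List.drop_eq_nil_of_le (by omega)
      rw [ht, hgd, hgd', alt_cons_nil, if_neg hg]
  · rw [class_group_range_loop, dif_neg h]
    have ht : tutors.drop rez = [] := List.drop_eq_nil_of_le (by omega)
    rw [ht]
    simp [class_group_range_alt]
termination_by tutors.length - rez

-- ===== VERDICT (by name: the statement is the Claim_ definition above) =====
theorem class_group_range_spec : Claim_equal_class_group_range := by
  intro tutors groups _
  unfold Spec_class_group_range class_group_range
  rw [loop_eq_alt_drop]
  simp
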